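-- pv_equiv track=rewrite | github.com/gisce/enerdata | enerdata/contracts/tariff.py | check_range_hours
-- ===== SOURCE A (Python) =====
-- def check_range_hours(hours):
--     before = (0, 0)
--     for range_hours in sorted(hours):
--         start, end = range_hours
--         if start >= end:
--             return False
--         if start < 0 or start > 24:
--             return False
--         if end < 1 or end > 24:
--             return False
--         if start < before[1]:
--             return False
--         before = (start, end)
--     return True
-- ===== SOURCE B (Python) =====
-- def check_range_hours(hours):
--     used = set()
--     for start, end in hours:
--         if not (0 <= start < end <= 24):
--             return False
--         slots = set(range(start, end))
--         if used & slots: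
--             return False
--         used |= slots
--     return True
-- ===== Notes on version B (the rewrite author's own statement) =====
-- stated objective: alternative
-- what changed: Drops the sort entirely: instead of sorting and scanning with a 'before' accumulator, B sweeps the list once in original order keeping an occupancy set of hour slots (set(range(start,end))) and rejects a range that is invalid or intersects the slots already taken; correct because after sorting adjacent non-overlap of valid ranges is exactly pairwise slot-disjointness, which is order-independent.
import Mathlib
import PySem

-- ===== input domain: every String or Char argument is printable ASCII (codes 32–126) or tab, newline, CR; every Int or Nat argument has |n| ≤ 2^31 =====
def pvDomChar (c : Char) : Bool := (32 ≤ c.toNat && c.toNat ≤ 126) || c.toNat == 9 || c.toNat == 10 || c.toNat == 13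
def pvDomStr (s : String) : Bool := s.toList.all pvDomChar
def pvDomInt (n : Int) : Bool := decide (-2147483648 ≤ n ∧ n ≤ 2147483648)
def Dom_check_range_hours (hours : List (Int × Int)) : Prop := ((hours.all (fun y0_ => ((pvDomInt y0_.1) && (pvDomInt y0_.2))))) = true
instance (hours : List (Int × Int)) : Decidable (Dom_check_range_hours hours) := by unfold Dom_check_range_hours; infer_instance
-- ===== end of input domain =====

-- B replaces A's sort-then-scan with an unsorted single sweep over an occupancy set of hour slots; same return value everywhere.

-- ===== PORT A =====
-- A's loop: state 'before', early returns become false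
def checkLoopA : (Int × Int) → List (Int × Int) → Bool
  | _, [] => true
  | before, rh :: rest =>
    let start := rh.1
    let «end» := rh.2
    if start ≥ «end» then false
    else if start < 0 ∨ start > 24 then false
    else if «end» < 1 ∨ «end» > 24 then false
    else if start < before.2 then false
    else checkLoopA (start, «end») rest

def check_range_hours (hours : List (Int × Int)) : Bool :=
  checkLoopA (0, 0) (PySem.List.sorted2 hours (·.1) (·.2))

-- ===== PORT B =====
-- B's loop: occupancy set 'used' of taken hour slots
def checkLoopB : PySem.Set Int → List (Int × Int) → Bool
  | _, [] => true
  | used, rh :: rest =>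
    let start := rh.1
    let «end» := rh.2
    if ¬ (0 ≤ start ∧ start < «end» ∧ «end» ≤ 24) then false
    else
      let slots : PySem.Set Int := PySem.Set.ofList (PySem.List.pyRange start «end» 1)
      if (PySem.Set.inter used slots).isEmpty then
        checkLoopB (PySem.Set.union used slots) rest
      else false

def check_range_hours_alt (hours : List (Int × Int)) : Bool :=
  checkLoopB PySem.Set.empty hours

-- ===== PRECONDITION & SPEC =====
def Spec_check_range_hours (hours : List (Int × Int)) (out : Bool) : Prop := out = check_range_hours_alt hours
instance (hours : List (Int × Int)) (out : Bool) : Decidable (Spec_check_range_hours hours out) := by unfold Spec_check_range_hours; infer_instance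

-- ===== CLAIM =====
def Claim_equal_check_range_hours : Prop := ∀ (hours : List (Int × Int)), Dom_check_range_hours hours → Spec_check_range_hours hours (check_range_hours hours)

-- ===== LEMMAS AND PROOFS =====

def pvValid (p : Int × Int) : Prop := 0 ≤ p.1 ∧ p.1 < p.2 ∧ p.2 ≤ 24
-- adjacency relation used by A after sorting
def pvAdj (p q : Int × Int) : Prop := p.2 ≤ q.1
-- interval disjointness as an order condition
def pvDis (p q : Int × Int) : Prop := p.2 ≤ q.1 ∨ q.2 ≤ p.1
-- interval disjointness as slot-set disjointness (what B tests)
def pvSDis (p q : Int × Int) : Prop := ∀ h : Int, ¬ (p.1 ≤ h ∧ h < p.2 ∧ q.1 ≤ h ∧ h < q.2)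

-- insertion preserves Pairwise R when 'before' decides R both ways and R is transitive
lemma insertBy_pairwise {α : Type} (R : α → α → Prop)
    (htrans : ∀ a b c, R a b → R b c → R a c)
    (before : α → α → Bool)
    (h1 : ∀ a b, before a b = true → R a b)
    (h2 : ∀ a b, before a b = false → R b a)
    (x : α) : ∀ ys : List α, ys.Pairwise R → (PySem.List.insertBy before x ys).Pairwise R := by
  intro ys
  induction ys with
  | nil => intro _; simp [PySem.List.insertBy]
  | cons y t ih =>
    intro hp
    rw [List.pairwise_cons] at hp
    obtain ⟨hy, ht⟩ := hp
    show (if before x y = true then x :: y :: t else y :: PySem.List.insertBy before x t).Pairwise R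
    split_ifs with hb
    · refine List.pairwise_cons.mpr ⟨?_, List.pairwise_cons.mpr ⟨hy, ht⟩⟩
      intro z hz
      rcases List.mem_cons.mp hz with rfl | hz'
      · exact h1 _ _ hb
      · exact htrans _ _ _ (h1 _ _ hb) (hy z hz')
    · refine List.pairwise_cons.mpr ⟨?_, ih ht⟩
      intro z hz
      rcases (PySem.List.mem_insertBy _ _ _ _).mp hz with rfl | hz'
      · exact h2 _ _ (Bool.eq_false_iff.mpr hb)
      · exact hy z hz'

-- the sorted list is nondecreasing in first components
lemma sorted2_pairwise_fst (xs : List (Int × Int)) :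
    (PySem.List.sorted2 xs (·.1) (·.2)).Pairwise (fun p q : Int × Int => p.1 ≤ q.1) := by
  show (List.foldl _ [] xs).Pairwise _
  have key : ∀ (l : List (Int × Int)) (acc : List (Int × Int)),
      acc.Pairwise (fun p q : Int × Int => p.1 ≤ q.1) →
      (l.foldl (fun acc x => PySem.List.insertBy
        (fun a b => decide (a.1 < b.1) || (!decide (b.1 < a.1) && decide (a.2 < b.2))) x acc) acc).Pairwise
        (fun p q : Int × Int => p.1 ≤ q.1) := by
    intro l
    induction l with
    | nil => intro acc h; simpa using h
    | cons x t ih =>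
      intro acc h
      refine ih _ (insertBy_pairwise (fun p q : Int × Int => p.1 ≤ q.1)
        (fun a b c h1 h2 => le_trans h1 h2)
        (fun a b : Int × Int => decide (a.1 < b.1) || (!decide (b.1 < a.1) && decide (a.2 < b.2)))
        ?_ ?_ x acc h)
      · intro a b hb; simp at hb; omega
      · intro a b hb; simp at hb; omega
  exact key xs [] (List.Pairwise.nil)

-- characterization of A's loop
lemma loopA_char : ∀ (l : List (Int × Int)) (b : Int × Int),
    checkLoopA b l = true ↔
      ((∀ p ∈ l, pvValid p) ∧ List.IsChain pvAdj l ∧ (∀ p, l.head? = some p → b.2 ≤ p.1)) := by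
  intro l
  induction l with
  | nil => intro b; simp [checkLoopA]
  | cons hd rest ih =>
    intro b
    obtain ⟨s, e⟩ := hd
    simp only [checkLoopA]
    split_ifs with h1 h2 h3 h4
    · simp only [false_iff]
      rintro ⟨hv, -, -⟩
      have := hv (s, e) List.mem_cons_self
      simp [pvValid] at this; omega
    · simp only [false_iff]
      rintro ⟨hv, -, -⟩
      have := hv (s, e) List.mem_cons_self
      simp [pvValid] at this; omega
    · simp only [false_iff]
      rintro ⟨hv, -, -⟩
      have := hv (s, e) List.mem_cons_self
      simp [pvValid] at this; omega
    · simp only [false_iff]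
      rintro ⟨-, -, hh⟩
      have := hh (s, e) rfl
      simp at this; omega
    · rw [ih (s, e)]
      constructor
      · rintro ⟨hv, hc, hh⟩
        refine ⟨?_, ?_, ?_⟩
        · intro p hp
          rcases List.mem_cons.mp hp with rfl | hp'
          · simp only [pvValid]; omega
          · exact hv p hp'
        · rw [List.isChain_cons]
          refine ⟨?_, hc⟩
          intro q hq
          exact hh q (by simpa using hq)
        · rintro p hp
          simp only [List.head?_cons, Option.some.injEq] at hp
          subst hp; simp; omega
      · rintro ⟨hv, hc, -⟩
        rw [List.isChain_cons] at hc
        obtain ⟨hhd, hc'⟩ := hc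
        refine ⟨fun p hp => hv p (List.mem_cons_of_mem _ hp), hc', ?_⟩
        intro p hp
        exact hhd p (by simpa using hp)

-- characterization of B's loop
lemma loopB_char : ∀ (l : List (Int × Int)) (used : PySem.Set Int),
    checkLoopB used l = true ↔
      ((∀ p ∈ l, pvValid p) ∧ l.Pairwise pvSDis ∧
       (∀ p ∈ l, ∀ h ∈ used, ¬ (p.1 ≤ h ∧ h < p.2))) := by
  intro l
  induction l with
  | nil => intro used; simp [checkLoopB]
  | cons hd rest ih =>
    intro used
    obtain ⟨s, e⟩ := hd
    simp only [checkLoopB]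
    have hslots : ∀ h : Int,
        h ∈ PySem.Set.ofList (PySem.List.pyRange s e 1) ↔ s ≤ h ∧ h < e := by
      intro h
      rw [PySem.Set.mem_ofList, PySem.List.mem_pyRange_one]
    rcases Decidable.em (0 ≤ s ∧ s < e ∧ e ≤ 24) with h1 | h1
    swap
    · rw [if_pos h1]
      refine iff_of_false (by simp) ?_
      rintro ⟨hv, -, -⟩
      exact h1 (hv (s, e) List.mem_cons_self)
    rw [if_neg (not_not_intro h1)]
    by_cases h2 : (PySem.Set.inter used (PySem.Set.ofList (PySem.List.pyRange s e 1))).isEmpty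
    · rw [if_pos h2]
      -- intersection empty: recurse
      have hempty : ∀ h : Int, ¬ (h ∈ used ∧ s ≤ h ∧ h < e) := by
        intro h hmem
        have : h ∈ PySem.Set.inter used (PySem.Set.ofList (PySem.List.pyRange s e 1)) :=
          (PySem.Set.mem_inter _ _ _).mpr ⟨hmem.1, (hslots h).mpr hmem.2⟩
        rw [List.isEmpty_iff] at h2
        simp [h2] at this
      rw [ih]
      constructor
      · rintro ⟨hv, hpw, hu⟩
        refine ⟨?_, ?_, ?_⟩
        · intro p hp
          rcases List.mem_cons.mp hp with rfl | hp'
          · exact h1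
          · exact hv p hp'
        · refine List.pairwise_cons.mpr ⟨?_, hpw⟩
          intro q hq h hh
          have hs : h ∈ PySem.Set.union used (PySem.Set.ofList (PySem.List.pyRange s e 1)) :=
            (PySem.Set.mem_union _ _ _).mpr (Or.inr ((hslots h).mpr ⟨hh.1, hh.2.1⟩))
          exact hu q hq h hs ⟨hh.2.2.1, hh.2.2.2⟩
        · intro p hp h hh
          rcases List.mem_cons.mp hp with rfl | hp'
          · intro hc; exact hempty h ⟨hh, hc⟩
          · exact hu p hp' h ((PySem.Set.mem_union _ _ _).mpr (Or.inl hh))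
      · rintro ⟨hv, hpw, hu⟩
        rw [List.pairwise_cons] at hpw
        obtain ⟨hhd, hpw'⟩ := hpw
        refine ⟨fun p hp => hv p (List.mem_cons_of_mem _ hp), hpw', ?_⟩
        intro p hp h hh
        rcases (PySem.Set.mem_union _ _ _).mp hh with hh' | hh'
        · exact hu p (List.mem_cons_of_mem _ hp) h hh'
        · have hse := (hslots h).mp hh'
          intro hc
          exact hhd p hp h ⟨hse.1, hse.2, hc.1, hc.2⟩
    · -- intersection nonempty: both sides false
      rw [if_neg h2]
      refine iff_of_false (by simp) ?_
      rintro ⟨hv, -, hu⟩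
      have hne : PySem.Set.inter used (PySem.Set.ofList (PySem.List.pyRange s e 1)) ≠ [] := by
        intro hc; exact h2 (List.isEmpty_iff.mpr hc)
      obtain ⟨h, hh⟩ := List.exists_mem_of_ne_nil _ hne
      have := (PySem.Set.mem_inter _ _ _).mp hh
      have hse := (hslots h).mp this.2
      exact hu (s, e) List.mem_cons_self h this.1 ⟨hse.1, hse.2⟩

lemma sdis_iff_dis (p q : Int × Int) (hp : pvValid p) (hq : pvValid q) :
    pvSDis p q ↔ pvDis p q := by
  unfold pvSDis pvDis pvValid at *
  constructor
  · intro h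
    by_contra hc
    push Not at hc
    exact h (max p.1 q.1) ⟨le_max_left _ _, by omega, le_max_right _ _, by omega⟩
  · intro h x hx
    omega

-- on a list sorted by first components with all ranges valid, adjacency chain = pairwise disjointness
lemma chain_iff_pairwise : ∀ s : List (Int × Int),
    s.Pairwise (fun p q : Int × Int => p.1 ≤ q.1) → (∀ p ∈ s, pvValid p) →
    (List.IsChain pvAdj s ↔ s.Pairwise pvDis) := by
  intro s
  induction s with
  | nil => intro _ _; simp
  | cons p t ih =>
    intro hsort hval
    rw [List.pairwise_cons] at hsort
    obtain ⟨hps, hts⟩ := hsort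
    rw [List.isChain_cons, List.pairwise_cons,
        ih hts (fun q hq => hval q (List.mem_cons_of_mem _ hq))]
    constructor
    · rintro ⟨hadj, hpw⟩
      refine ⟨?_, hpw⟩
      intro r hr
      cases t with
      | nil => cases hr
      | cons q t' =>
        have hpq : pvAdj p q := hadj q rfl
        have hqr : q.1 ≤ r.1 := by
          rcases List.mem_cons.mp hr with rfl | hr'
          · exact le_rfl
          · exact (List.pairwise_cons.mp hts).1 r hr'
        exact Or.inl (le_trans hpq hqr)
    · rintro ⟨hdis, hpw⟩
      refine ⟨?_, hpw⟩
      intro q hq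
      have hq' : q ∈ t := List.mem_of_mem_head? hq
      have h1 : p.1 ≤ q.1 := hps q hq'
      have hvq := hval q (List.mem_cons_of_mem _ hq')
      unfold pvValid at hvq
      rcases hdis q hq' with h | h
      · exact h
      · exact absurd h (by omega)

-- ===== VERDICT =====
theorem check_range_hours_spec : Claim_equal_check_range_hours := by
  intro hours _
  unfold Spec_check_range_hours check_range_hours check_range_hours_alt
  have hperm : (PySem.List.sorted2 hours (·.1) (·.2)).Perm hours :=
    PySem.List.sorted2_perm hours _ _ false
  have hsort := sorted2_pairwise_fst hours
  rw [Bool.eq_iff_iff, loopA_char, loopB_char]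
  set s := PySem.List.sorted2 hours (·.1) (·.2) with hs
  have hmem : ∀ p, p ∈ s ↔ p ∈ hours := fun p => hperm.mem_iff
  constructor
  · rintro ⟨hv, hc, -⟩
    have hvl : ∀ p ∈ hours, pvValid p := fun p hp => hv p ((hmem p).mpr hp)
    have hpwS : s.Pairwise pvDis := (chain_iff_pairwise s hsort hv).mp hc
    have hpwL : hours.Pairwise pvDis :=
      (hperm.pairwise_iff (fun h => h.symm)).mp hpwS
    refine ⟨hvl, ?_, ?_⟩
    · exact hpwL.imp_of_mem (fun {a b} ha hb h =>
        (sdis_iff_dis a b (hvl a ha) (hvl b hb)).mpr h)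
    · intro p _ h hh
      simp [PySem.Set.empty] at hh
  · rintro ⟨hv, hpw, -⟩
    have hvs : ∀ p ∈ s, pvValid p := fun p hp => hv p ((hmem p).mp hp)
    have hpwD : hours.Pairwise pvDis :=
      hpw.imp_of_mem (fun {a b} ha hb h =>
        (sdis_iff_dis a b (hv a ha) (hv b hb)).mp h)
    have hpwS : s.Pairwise pvDis :=
      (hperm.pairwise_iff (fun h => h.symm)).mpr hpwD
    refine ⟨hvs, (chain_iff_pairwise s hsort hvs).mpr hpwS, ?_⟩
    intro p hp
    have := hvs p (List.mem_of_mem_head? (by simp [hp]))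
    unfold pvValid at this
    omega
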